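-- pv_equiv track=rewrite | github.com/LocusLontrime/Python | Games/Three_dots_game.py | make_grid_from_blueprint
-- ===== SOURCE A (Python) =====
-- def make_grid_from_blueprint(game_map: str):
--     grid, start_dots, end_dots = [], {}, {}
--     for y, row in enumerate(game_map.split('\n')[1:-1]):
--         grid.append([])
--         for x, s in enumerate(row[1:-1]):
--             if s in (l := ['R', 'G', 'Y']):
--                 cell = y, x, True
--                 start_dots[l.index(s)] = cell[:2]
--             elif s in (l := ['r', 'g', 'y']):
--                 cell = y, x, True
--                 end_dots[l.index(s)] = cell[:2]
--             elif s == '*':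
--                 cell = y, x, False
--             else:
--                 cell = y, x, True
--             grid[y].append(cell)
--     return grid, start_dots, end_dots
-- ===== SOURCE B (Python) =====
-- def make_grid_from_blueprint(game_map: str):
--     rows = [row[1:-1] for row in game_map.split('\n')[1:-1]]
--     grid = [[(y, x, s != '*') for x, s in enumerate(row)] for y, row in enumerate(rows)]
--     cells = [(y, x, s) for y, row in enumerate(rows) for x, s in enumerate(row)]
--     start_dots = {}
--     for y, x, s in cells:
--         if s in 'RGY':
--             start_dots['RGY'.index(s)] = (y, x)
--     end_dots = {}
--     for y, x, s in cells:
--         if s in 'rgy':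
--             end_dots['rgy'.index(s)] = (y, x)
--     return grid, start_dots, end_dots
-- ===== Notes on version B (the rewrite author's own statement) =====
-- stated objective: alternative
-- what changed: Replaces A's single fused loop (which classifies each char with a four-way branch while simultaneously growing the grid row and both dot dictionaries) by three independent passes: a nested comprehension building the whole grid from the non-wall test, a flattened cell list, and one membership-test scan per dot dictionary.
import Mathlib
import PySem

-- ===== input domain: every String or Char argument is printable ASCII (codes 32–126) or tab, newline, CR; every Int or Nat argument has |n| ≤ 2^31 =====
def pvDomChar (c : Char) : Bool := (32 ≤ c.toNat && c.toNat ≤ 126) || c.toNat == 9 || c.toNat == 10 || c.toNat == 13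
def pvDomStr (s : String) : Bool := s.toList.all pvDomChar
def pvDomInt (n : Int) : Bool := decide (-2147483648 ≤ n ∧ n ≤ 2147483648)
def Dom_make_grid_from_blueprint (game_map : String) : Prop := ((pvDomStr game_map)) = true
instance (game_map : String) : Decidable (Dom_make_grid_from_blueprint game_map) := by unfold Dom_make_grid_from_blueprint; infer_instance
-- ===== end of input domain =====

-- B rebuilds the parse as three independent passes (grid table comprehension, then one scan per
-- dot dictionary over a flattened cell list) instead of A's single fused classifying loop;
-- objective: alternative decomposition, same cost.

-- ===== PORT A =====
-- A's inner loop body: classify the char s at (y, x), extend the current grid row, update the dicts.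
-- l.index(s) is called only under 's in l', so '(index? l s).getD 0' is exact there.
def make_grid_from_blueprint_A_step (y : Int)
    (st : List (Int × Int × Bool) × PySem.Dict Int (Int × Int) × PySem.Dict Int (Int × Int))
    (xs : Int × Char) :
    List (Int × Int × Bool) × PySem.Dict Int (Int × Int) × PySem.Dict Int (Int × Int) :=
  if xs.2 ∈ ['R', 'G', 'Y'] then
    (st.1 ++ [(y, xs.1, true)], st.2.1.insert ((PySem.List.index? ['R', 'G', 'Y'] xs.2).getD 0 : Nat) (y, xs.1), st.2.2)
  else if xs.2 ∈ ['r', 'g', 'y'] then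
    (st.1 ++ [(y, xs.1, true)], st.2.1, st.2.2.insert ((PySem.List.index? ['r', 'g', 'y'] xs.2).getD 0 : Nat) (y, xs.1))
  else if xs.2 = '*' then
    (st.1 ++ [(y, xs.1, false)], st.2.1, st.2.2)
  else
    (st.1 ++ [(y, xs.1, true)], st.2.1, st.2.2)

-- A's outer loop body: grid.append([]) then the inner loop fills that fresh row via grid[y].append(cell).
def make_grid_from_blueprint_A_row
    (st : List (List (Int × Int × Bool)) × PySem.Dict Int (Int × Int) × PySem.Dict Int (Int × Int))
    (yr : Int × List Char) :
    List (List (Int × Int × Bool)) × PySem.Dict Int (Int × Int) × PySem.Dict Int (Int × Int) :=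
  let inner := (PySem.List.enumerate (PySem.List.slice yr.2 (some 1) (some (-1)))).foldl
    (make_grid_from_blueprint_A_step yr.1) ([], st.2.1, st.2.2)
  (st.1 ++ [inner.1], inner.2.1, inner.2.2)

def make_grid_from_blueprint (game_map : String) :
    (List (List (Int × Int × Bool))) × (List (Int × Int × Int)) × (List (Int × Int × Int)) :=
  let rows := PySem.List.slice (PySem.Chars.splitOn game_map.toList ['\n']) (some 1) (some (-1))
  let st := (PySem.List.enumerate rows).foldl make_grid_from_blueprint_A_row
    ([], PySem.Dict.empty, PySem.Dict.empty)
  (st.1, st.2.1.items, st.2.2.items)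

-- ===== PORT B =====
-- trimmed rows once, then three separate passes: a grid comprehension, a flattened cell list,
-- and one scan per dot dictionary. 'RGY'.index(s) under 's in "RGY"' → (index? …).getD 0, exact there.
def make_grid_from_blueprint_alt (game_map : String) :
    (List (List (Int × Int × Bool))) × (List (Int × Int × Int)) × (List (Int × Int × Int)) :=
  let rows := (PySem.List.slice (PySem.Chars.splitOn game_map.toList ['\n']) (some 1) (some (-1))).map
      (fun row => PySem.List.slice row (some 1) (some (-1)))
  let grid := (PySem.List.enumerate rows).map
      (fun yr => (PySem.List.enumerate yr.2).map (fun xs => (yr.1, xs.1, xs.2 != '*')))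
  let cells := (PySem.List.enumerate rows).flatMap
      (fun yr => (PySem.List.enumerate yr.2).map (fun xs => (yr.1, xs.1, xs.2)))
  let sd := cells.foldl
      (fun (d : PySem.Dict Int (Int × Int)) c =>
        if c.2.2 ∈ ['R', 'G', 'Y'] then
          d.insert ((PySem.List.index? ['R', 'G', 'Y'] c.2.2).getD 0 : Nat) (c.1, c.2.1)
        else d) PySem.Dict.empty
  let ed := cells.foldl
      (fun (d : PySem.Dict Int (Int × Int)) c =>
        if c.2.2 ∈ ['r', 'g', 'y'] then
          d.insert ((PySem.List.index? ['r', 'g', 'y'] c.2.2).getD 0 : Nat) (c.1, c.2.1)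
        else d) PySem.Dict.empty
  (grid, sd.items, ed.items)

-- ===== PRECONDITION & SPEC =====
def Spec_make_grid_from_blueprint (game_map : String) (out : (List (List (Int × Int × Bool))) × (List (Int × Int × Int)) × (List (Int × Int × Int))) : Prop := out = make_grid_from_blueprint_alt game_map
instance (game_map : String) (out : (List (List (Int × Int × Bool))) × (List (Int × Int × Int)) × (List (Int × Int × Int))) : Decidable (Spec_make_grid_from_blueprint game_map out) := by unfold Spec_make_grid_from_blueprint; infer_instance

-- ===== CLAIM (what is proved, stated in full; the proofs are below) =====
def Claim_equal_make_grid_from_blueprint : Prop := ∀ (game_map : String), Dom_make_grid_from_blueprint game_map → Spec_make_grid_from_blueprint game_map (make_grid_from_blueprint game_map)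

-- ===== LEMMAS AND PROOFS =====

-- B's step function for a dot dictionary, over a (y, x, s) cell triple.
def pvDotStep (l : List Char) (d : PySem.Dict Int (Int × Int)) (c : Int × Int × Char) :
    PySem.Dict Int (Int × Int) :=
  if c.2.2 ∈ l then d.insert ((PySem.List.index? l c.2.2).getD 0 : Nat) (c.1, c.2.1) else d

-- A's inner loop over one row = B's grid row appended, plus the two dot folds over that row's triples.
theorem pv_inner_eq (y : Int) (chars : List Char) (x0 : Int) (acc : List (Int × Int × Bool))
    (sd ed : PySem.Dict Int (Int × Int)) :
    (PySem.List.enumerate chars x0).foldl (make_grid_from_blueprint_A_step y) (acc, sd, ed) =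
    (acc ++ (PySem.List.enumerate chars x0).map (fun xs => (y, xs.1, xs.2 != '*')),
      ((PySem.List.enumerate chars x0).map (fun xs => (y, xs.1, xs.2))).foldl (pvDotStep ['R', 'G', 'Y']) sd,
      ((PySem.List.enumerate chars x0).map (fun xs => (y, xs.1, xs.2))).foldl (pvDotStep ['r', 'g', 'y']) ed) := by
  induction chars generalizing x0 acc sd ed with
  | nil => simp [PySem.List.enumerate_nil]
  | cons c cs ih =>
    rw [PySem.List.enumerate_cons]
    simp only [List.foldl_cons, List.map_cons]
    by_cases h1 : c ∈ ['R', 'G', 'Y']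
    · have hst : ¬ c = '*' := by fin_cases h1 <;> decide
      have hne : ¬ c ∈ ['r', 'g', 'y'] := by fin_cases h1 <;> decide
      rw [show make_grid_from_blueprint_A_step y (acc, sd, ed) (x0, c) =
        (acc ++ [(y, x0, true)], sd.insert ((PySem.List.index? ['R', 'G', 'Y'] c).getD 0 : Nat) (y, x0), ed) by
          simp [make_grid_from_blueprint_A_step, h1], ih]
      simp [pvDotStep, h1, hst, hne]
    · by_cases h2 : c ∈ ['r', 'g', 'y']
      · have hst : ¬ c = '*' := by fin_cases h2 <;> decide
        rw [show make_grid_from_blueprint_A_step y (acc, sd, ed) (x0, c) =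
          (acc ++ [(y, x0, true)], sd, ed.insert ((PySem.List.index? ['r', 'g', 'y'] c).getD 0 : Nat) (y, x0)) by
            simp [make_grid_from_blueprint_A_step, h1, h2], ih]
        simp [pvDotStep, h1, h2, hst]
      · by_cases h3 : c = '*'
        · rw [show make_grid_from_blueprint_A_step y (acc, sd, ed) (x0, c) =
            (acc ++ [(y, x0, false)], sd, ed) by simp [make_grid_from_blueprint_A_step, h3], ih]
          simp [pvDotStep, h3]
        · rw [show make_grid_from_blueprint_A_step y (acc, sd, ed) (x0, c) =
            (acc ++ [(y, x0, true)], sd, ed) by simp [make_grid_from_blueprint_A_step, h1, h2, h3], ih]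
          simp [pvDotStep, h1, h2, h3]

-- A's outer loop = B's three passes, for any list of raw rows.
theorem pv_outer_eq (rows : List (List Char)) (y0 : Int) (g : List (List (Int × Int × Bool)))
    (sd ed : PySem.Dict Int (Int × Int)) :
    (PySem.List.enumerate rows y0).foldl make_grid_from_blueprint_A_row (g, sd, ed) =
    (g ++ (PySem.List.enumerate (rows.map (fun row => PySem.List.slice row (some 1) (some (-1)))) y0).map
        (fun yr => (PySem.List.enumerate yr.2).map (fun xs => (yr.1, xs.1, xs.2 != '*'))),
      ((PySem.List.enumerate (rows.map (fun row => PySem.List.slice row (some 1) (some (-1)))) y0).flatMap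
        (fun yr => (PySem.List.enumerate yr.2).map (fun xs => (yr.1, xs.1, xs.2)))).foldl (pvDotStep ['R', 'G', 'Y']) sd,
      ((PySem.List.enumerate (rows.map (fun row => PySem.List.slice row (some 1) (some (-1)))) y0).flatMap
        (fun yr => (PySem.List.enumerate yr.2).map (fun xs => (yr.1, xs.1, xs.2)))).foldl (pvDotStep ['r', 'g', 'y']) ed) := by
  induction rows generalizing y0 g sd ed with
  | nil => simp [PySem.List.enumerate_nil]
  | cons r rs ih =>
    rw [List.map_cons, PySem.List.enumerate_cons, PySem.List.enumerate_cons, List.foldl_cons,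
      show make_grid_from_blueprint_A_row (g, sd, ed) (y0, r) =
        (g ++ [(PySem.List.enumerate (PySem.List.slice r (some 1) (some (-1)))).map (fun xs => (y0, xs.1, xs.2 != '*'))],
          ((PySem.List.enumerate (PySem.List.slice r (some 1) (some (-1)))).map (fun xs => (y0, xs.1, xs.2))).foldl (pvDotStep ['R', 'G', 'Y']) sd,
          ((PySem.List.enumerate (PySem.List.slice r (some 1) (some (-1)))).map (fun xs => (y0, xs.1, xs.2))).foldl (pvDotStep ['r', 'g', 'y']) ed) by
        simp [make_grid_from_blueprint_A_row, pv_inner_eq], ih]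
    simp [List.foldl_append]

-- ===== VERDICT (by name: the statement is the Claim_ definition above) =====
theorem make_grid_from_blueprint_spec : Claim_equal_make_grid_from_blueprint := by
  intro game_map _
  show _ = _
  unfold make_grid_from_blueprint make_grid_from_blueprint_alt
  simp only [pv_outer_eq, List.nil_append]
  rfl
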